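-- pv_equiv track=rewrite | github.com/todatech/checkio | py_checkio_solutions/Scientific Expedition/caps_lock.py | caps_lock
-- ===== SOURCE A (Python) =====
-- def caps_lock(text: str) -> str:
--
--     CAP_LOCK = False
--
--     ans = ''
--
--     for n in text:
--         if n == 'a':
--             if CAP_LOCK:
--                 CAP_LOCK = False
--             else:
--                 CAP_LOCK = True
--         else:
--             if CAP_LOCK:
--                 ans += n.upper()
--             else:
--                 ans += n
--
--     return ans
-- ===== SOURCE B (Python) =====
-- def caps_lock(text: str) -> str:
--     parts = text.split('a')
--     return ''.join(p.upper() if i % 2 else p for i, p in enumerate(parts))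
-- ===== Notes on version B (the rewrite author's own statement) =====
-- stated objective: simpler
-- what changed: Replaces the stateful char-by-char caps-lock toggle scan with split('a') followed by an index-parity map (odd segments uppercased) joined back together.
import Mathlib
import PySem

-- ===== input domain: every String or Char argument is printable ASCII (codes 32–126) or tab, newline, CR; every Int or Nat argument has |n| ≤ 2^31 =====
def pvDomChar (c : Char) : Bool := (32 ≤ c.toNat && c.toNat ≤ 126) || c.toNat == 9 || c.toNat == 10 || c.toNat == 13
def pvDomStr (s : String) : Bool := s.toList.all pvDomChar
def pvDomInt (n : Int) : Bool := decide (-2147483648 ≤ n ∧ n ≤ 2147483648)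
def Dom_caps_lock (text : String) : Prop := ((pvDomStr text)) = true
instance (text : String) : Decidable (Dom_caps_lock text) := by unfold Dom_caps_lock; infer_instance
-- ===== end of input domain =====

-- B replaces A's stateful char-by-char caps-lock toggle with split-on-'a' plus an
-- index-parity map over the segments (objective: simpler).


-- ===== PORT A =====
def caps_lock (text : String) : String :=
  let r := text.toList.foldl
    (fun (st : Bool × List Char) n =>
      if n = 'a' then
        (if st.1 then (false, st.2) else (true, st.2))
      else
        (if st.1 then (st.1, st.2 ++ PySem.Chars.upper [n]) else (st.1, st.2 ++ [n])))
    (false, [])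
  String.mk r.2

-- ===== PORT B =====
def caps_lock_alt (text : String) : String :=
  let parts := PySem.Chars.splitOn text.toList ['a']
  String.mk (PySem.Chars.join []
    ((PySem.List.enumerate parts).map
      (fun p => if p.1 % 2 = 1 then PySem.Chars.upper p.2 else p.2)))

-- ===== PRECONDITION & SPEC =====
def Spec_caps_lock (text : String) (out : String) : Prop := out = caps_lock_alt text
instance (text : String) (out : String) : Decidable (Spec_caps_lock text out) := by unfold Spec_caps_lock; infer_instance

-- ===== CLAIM (what is proved, stated in full; the proofs are below) =====
def Claim_equal_caps_lock : Prop := ∀ (text : String), Dom_caps_lock text → Spec_caps_lock text (caps_lock text)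

-- ===== LEMMAS AND PROOFS =====

-- splitAcc pre l = the segments of l split on 'a', with pre prepended to the first segment
def splitAcc (pre : List Char) : List Char -> List (List Char)
  | [] => [pre]
  | c :: l => if c = 'a' then pre :: splitAcc [] l else splitAcc (pre ++ [c]) l

-- scanA l b = the characters A's loop appends when scanning l starting with CAP_LOCK = b
def scanA : List Char -> Bool -> List Char
  | [], _ => []
  | c :: l, b =>
    if c = 'a' then scanA l (!b) else (if b then PySem.Chars.upper [c] else [c]) ++ scanA l b

-- gpar b ps = the segments ps joined, uppercasing the first iff b and alternating thereafter
def gpar : Bool -> List (List Char) -> List Char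
  | _, [] => []
  | b, p :: ps => (if b then PySem.Chars.upper p else p) ++ gpar (!b) ps

theorem join_nil_flatten (ps : List (List Char)) : PySem.Chars.join [] ps = ps.flatten := by
  induction ps with
  | nil => rfl
  | cons p ps ih =>
    simp only [PySem.Chars.join, List.intercalate] at *
    cases ps <;> simp_all

theorem go_splitAcc (fuel : Nat) : forall (l cur : List Char) (acc : List (List Char)),
    l.length < fuel ->
    PySem.Chars.splitOn.go ['a'] fuel l cur acc = acc.reverse ++ splitAcc cur.reverse l := by
  induction fuel with
  | zero => intro l cur acc h; omega
  | succ n ih =>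
    intro l cur acc h
    cases l with
    | nil => simp [PySem.Chars.splitOn.go, splitAcc]
    | cons c rest =>
      by_cases hc : c = 'a'
      · subst hc
        have h1 : rest.length < n := by simpa using Nat.lt_of_succ_lt_succ h
        simp only [PySem.Chars.splitOn.go, List.isPrefixOf, BEq.rfl, Bool.true_and,
          List.isPrefixOf_nil_left, if_true, List.length_cons, List.drop_succ_cons,
          List.drop_zero, List.length_nil]
        rw [ih rest [] (cur.reverse :: acc) h1]
        simp [splitAcc]
      · have h1 : rest.length < n := by simpa using Nat.lt_of_succ_lt_succ h
        have hpre : (['a'].isPrefixOf (c :: rest)) = false := by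
          simp [List.isPrefixOf]
          intro hh; exact absurd hh.symm hc
        simp only [PySem.Chars.splitOn.go, hpre, Bool.false_eq_true, if_false]
        rw [ih rest (c :: cur) acc h1]
        simp [splitAcc, hc]

theorem foldA : forall (l : List Char) (b : Bool) (acc : List Char),
    (l.foldl
      (fun (st : Bool × List Char) n =>
        if n = 'a' then
          (if st.1 then (false, st.2) else (true, st.2))
        else
          (if st.1 then (st.1, st.2 ++ PySem.Chars.upper [n]) else (st.1, st.2 ++ [n])))
      (b, acc)).2 = acc ++ scanA l b := by
  intro l
  induction l with
  | nil => intro b acc; simp [scanA]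
  | cons c l ih =>
    intro b acc
    by_cases hc : c = 'a'
    · cases b <;> simp [hc, scanA, List.foldl_cons, ih]
    · cases b <;> simp [hc, scanA, List.foldl_cons, ih]

theorem enumJoin : forall (ps : List (List Char)) (i : Int), 0 <= i ->
    ((PySem.List.enumerate ps i).map
        (fun p => if p.1 % 2 = 1 then PySem.Chars.upper p.2 else p.2)).flatten
      = gpar (decide (i % 2 = 1)) ps := by
  intro ps
  induction ps with
  | nil => intro i _; simp [PySem.List.enumerate, gpar]
  | cons p ps ih =>
    intro i hi
    rw [PySem.List.enumerate_cons]
    by_cases h : i % 2 = 1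
    · have h2 : (i + 1) % 2 = 0 := by omega
      simp [h, h2, gpar, ih (i + 1) (by omega)]
    · have h0 : i % 2 = 0 := by omega
      have h2 : (i + 1) % 2 = 1 := by omega
      simp [h, h2, gpar, ih (i + 1) (by omega)]

theorem gSplit : forall (l : List Char) (b : Bool) (pre : List Char),
    gpar b (splitAcc pre l) = (if b then PySem.Chars.upper pre else pre) ++ scanA l b := by
  intro l
  induction l with
  | nil => intro b pre; cases b <;> simp [splitAcc, gpar, scanA]
  | cons c l ih =>
    intro b pre
    by_cases hc : c = 'a'
    · cases b <;> simp [hc, splitAcc, gpar, scanA, ih, PySem.Chars.upper]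
    · cases b <;>
        simp [hc, splitAcc, gpar, scanA, ih, PySem.Chars.upper]
-- ===== VERDICT (by name: the statement is the Claim_ definition above) =====
theorem caps_lock_spec : Claim_equal_caps_lock := by
  intro text _
  unfold Spec_caps_lock caps_lock caps_lock_alt
  dsimp only
  rw [join_nil_flatten]
  rw [foldA text.toList false []]
  unfold PySem.Chars.splitOn
  rw [go_splitAcc (text.toList.length + 1) text.toList [] [] (Nat.lt_succ_self _)]
  rw [enumJoin _ 0 (by omega)]
  simp [gSplit text.toList false []]
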